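-- pv_equiv track=rewrite | github.com/Kronostheus/Thesis | ner_split.py | sentence_fix
-- ===== SOURCE A (Python) =====
-- def sentence_fix(sentences, masks, codes):
--     new_sentences, new_masks, new_codes = [], [], []
--     tmp_sentence, tmp_mask, tmp_code = sentences[0], masks[0], codes[0]
--
--     for i, (sentence, mask, code) in enumerate(zip(sentences, masks, codes)):
--         if mask[0] in ('B', 'O'):
--             new_sentences.append(tmp_sentence)
--             new_masks.append(tmp_mask)
--             new_codes.append(tmp_code)
--             tmp_sentence, tmp_mask, tmp_code = sentence, mask, code
--         else:
--             tmp_sentence = '{} {}'.format(tmp_sentence, sentence)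
--             tmp_mask = '{}I{}'.format(tmp_mask, mask)
--             tmp_code = '{}{}{}'.format(tmp_code, code[0], code)
--
--     return new_sentences[1:], new_masks[1:], new_codes[1:]
-- ===== SOURCE B (Python) =====
-- def sentence_fix(sentences, masks, codes):
--     # Group-based rewrite: partition rows at B/O boundaries, then merge each
--     # group; rows before the first boundary and the final group are never
--     # emitted (matching A's seed-and-slice / missing final flush behaviour).
--     groups = []
--     for row in zip(sentences, masks, codes):
--         if row[1][0] in ('B', 'O'):
--             groups.append([row])
--         elif groups:
--             groups[-1].append(row)
--     done = groups[:-1]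
--     new_sentences = [' '.join(s for s, _, _ in g) for g in done]
--     new_masks = ['I'.join(m for _, m, _ in g) for g in done]
--     new_codes = [g[0][2] + ''.join(c[0] + c for _, _, c in g[1:]) for g in done]
--     return new_sentences, new_masks, new_codes
-- ===== Notes on version B (the rewrite author's own statement) =====
-- stated objective: alternative
-- what changed: B replaces A's running accumulator (seeded with row 0, flushed at each B/O boundary, sliced by [1:]) with an explicit two-phase grouping: one pass partitions the zipped rows into groups at B/O boundaries, then each group except the last is merged with join operations.
import Mathlib
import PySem

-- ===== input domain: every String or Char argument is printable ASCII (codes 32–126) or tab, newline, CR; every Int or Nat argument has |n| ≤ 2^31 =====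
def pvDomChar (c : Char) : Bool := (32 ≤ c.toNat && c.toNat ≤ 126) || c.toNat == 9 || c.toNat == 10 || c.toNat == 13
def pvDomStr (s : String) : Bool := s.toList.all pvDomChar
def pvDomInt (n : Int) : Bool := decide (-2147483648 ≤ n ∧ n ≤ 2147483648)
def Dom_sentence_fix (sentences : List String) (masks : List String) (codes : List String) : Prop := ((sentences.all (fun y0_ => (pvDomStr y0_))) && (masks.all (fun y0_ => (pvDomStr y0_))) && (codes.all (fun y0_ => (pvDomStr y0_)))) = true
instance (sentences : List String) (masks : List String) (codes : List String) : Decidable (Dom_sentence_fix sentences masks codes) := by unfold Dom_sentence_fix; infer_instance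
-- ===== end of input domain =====

-- B re-groups the rows at B/O boundaries and merges each group in one place,
-- instead of A's running accumulator with seed-and-slice; same return value
-- on all inputs where A returns (objective: alternative decomposition).

-- ===== PORT A =====

-- mask[0] in ('B', 'O'); exact whenever the mask is nonempty (Pre_); on an
-- empty mask Python raises IndexError, the port answers false there.
def pvIsBO (m : String) : Bool :=
  PySem.Str.pyGet? m 0 == some 'B' || PySem.Str.pyGet? m 0 == some 'O'

-- code[0] as a string; exact whenever the code is nonempty (Pre_); on an
-- empty code Python raises IndexError, the port answers "" there.
def pvHeadStr (c : String) : String :=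
  ((PySem.Str.pyGet? c 0).map Char.toString).getD ""

-- the loop body of A: state = ((new_sentences, new_masks, new_codes), (tmp_sentence, tmp_mask, tmp_code))
def pvStepA (acc : (List String × List String × List String) × (String × String × String))
    (row : String × String × String) :
    (List String × List String × List String) × (String × String × String) :=
  let ((ns, nm, nc), (ts, tm, tc)) := acc
  let (s, m, c) := row
  if pvIsBO m then
    ((ns ++ [ts], nm ++ [tm], nc ++ [tc]), (s, m, c))
  else
    ((ns, nm, nc), (ts ++ " " ++ s, tm ++ "I" ++ m, tc ++ pvHeadStr c ++ c))

def sentence_fix (sentences : List String) (masks : List String) (codes : List String) : List String × List String × List String :=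
  -- sentences[0], masks[0], codes[0]: none = IndexError (excluded by Pre_)
  match PySem.List.pyGet? sentences 0, PySem.List.pyGet? masks 0, PySem.List.pyGet? codes 0 with
  | some s0, some m0, some c0 =>
      let r := (sentences.zip (masks.zip codes)).foldl pvStepA (([], [], []), (s0, m0, c0))
      (r.1.1.drop 1, r.1.2.1.drop 1, r.1.2.2.drop 1)   -- xs[1:] = List.drop 1 (exact)
  | _, _, _ => ([], [], [])

-- ===== PORT B =====

-- the grouping loop of Source B: start a group at a B/O row, append a
-- continuation row to the last group if any
def pvStepB (gs : List (List (String × String × String))) (row : String × String × String) :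
    List (List (String × String × String)) :=
  if pvIsBO row.2.1 then gs ++ [[row]]
  else
    match gs.getLast? with
    | none => gs
    | some g => gs.dropLast ++ [g ++ [row]]

-- ' '.join(s for s, _, _ in g)
def pvMergeS (g : List (String × String × String)) : String :=
  PySem.Str.join " " (g.map (·.1))

-- 'I'.join(m for _, m, _ in g)
def pvMergeM (g : List (String × String × String)) : String :=
  PySem.Str.join "I" (g.map (·.2.1))

-- g[0][2] + ''.join(c[0] + c for _, _, c in g[1:])
def pvMergeC (g : List (String × String × String)) : String :=
  match g with
  | [] => ""
  | r :: t => r.2.2 ++ PySem.Str.join "" (t.map (fun q => pvHeadStr q.2.2 ++ q.2.2))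

def sentence_fix_alt (sentences : List String) (masks : List String) (codes : List String) : List String × List String × List String :=
  let done := ((sentences.zip (masks.zip codes)).foldl pvStepB []).dropLast   -- groups[:-1]
  (done.map pvMergeS, done.map pvMergeM, done.map pvMergeC)

-- ===== PRECONDITION & SPEC =====
-- Pre_ excludes exactly the inputs where A raises IndexError: an empty input
-- list (sentences[0]/masks[0]/codes[0]) , an empty mask among the zipped rows
-- (mask[0]), or an empty code on a continuation row (code[0]).
def Pre_sentence_fix (sentences : List String) (masks : List String) (codes : List String) : Prop :=
  sentences ≠ [] ∧ masks ≠ [] ∧ codes ≠ [] ∧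
  ∀ r ∈ sentences.zip (masks.zip codes),
    r.2.1 ≠ "" ∧ ((r.2.1.toList.head? ≠ some 'B' ∧ r.2.1.toList.head? ≠ some 'O') → r.2.2 ≠ "")

instance (sentences : List String) (masks : List String) (codes : List String) : Decidable (Pre_sentence_fix sentences masks codes) := by unfold Pre_sentence_fix; infer_instance

def pvWitness_sentence_fix : List String × List String × List String :=
  (["He went", "home .", "Stop ."], ["B-LOC", "I-LOC", "O"], ["Q1", "Q2", "Q3"])

def Spec_sentence_fix (sentences : List String) (masks : List String) (codes : List String) (out : List String × List String × List String) : Prop := out = sentence_fix_alt sentences masks codes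
instance (sentences : List String) (masks : List String) (codes : List String) (out : List String × List String × List String) : Decidable (Spec_sentence_fix sentences masks codes out) := by unfold Spec_sentence_fix; infer_instance

-- ===== CLAIM (what is proved, stated in full; the proofs are below) =====
def Claim_equal_sentence_fix : Prop := ∀ (sentences : List String) (masks : List String) (codes : List String), Dom_sentence_fix sentences masks codes → Pre_sentence_fix sentences masks codes → Spec_sentence_fix sentences masks codes (sentence_fix sentences masks codes)

-- ===== LEMMAS AND PROOFS =====

-- A's final slice, B's final merge/slice, A's flushed-output shape, B's tmp shape
def pvFinishA (r : (List String × List String × List String) × (String × String × String)) :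
    List String × List String × List String :=
  (r.1.1.drop 1, r.1.2.1.drop 1, r.1.2.2.drop 1)

def pvFinishB (gs : List (List (String × String × String))) :
    List String × List String × List String :=
  (gs.dropLast.map pvMergeS, gs.dropLast.map pvMergeM, gs.dropLast.map pvMergeC)

def pvOutA (b : String × String × String) (gs : List (List (String × String × String))) :
    List String × List String × List String :=
  (b.1 :: gs.map pvMergeS, b.2.1 :: gs.map pvMergeM, b.2.2 :: gs.map pvMergeC)

def pvMergeT (g : List (String × String × String)) : String × String × String :=
  (pvMergeS g, pvMergeM g, pvMergeC g)

-- sep.join(xs + [y]) = sep.join(xs) + sep + y for nonempty xs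
theorem pv_join_concat (sep y : String) (x : String) (xs : List String) :
    PySem.Str.join sep ((x :: xs) ++ [y]) = PySem.Str.join sep (x :: xs) ++ sep ++ y := by
  induction xs generalizing x with
  | nil =>
      rw [← String.toList_inj]
      simp [PySem.Chars.join_cons_cons, PySem.Chars.join_singleton]
  | cons z zs ih =>
      rw [← String.toList_inj]
      have h1 := congrArg String.toList (ih z)
      simp [PySem.Chars.join_cons_cons] at h1 ⊢
      simp [h1]

theorem pv_mergeT_single (r : String × String × String) : pvMergeT [r] = r := by
  refine Prod.ext ?_ (Prod.ext ?_ ?_)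
  · rw [← String.toList_inj]
    simp [pvMergeT, pvMergeS, PySem.Chars.join_singleton]
  · rw [← String.toList_inj]
    simp [pvMergeT, pvMergeM, PySem.Chars.join_singleton]
  · rw [← String.toList_inj]
    simp [pvMergeT, pvMergeC, PySem.Chars.join, List.intercalate]

theorem pv_mergeT_snoc (g : List (String × String × String)) (r : String × String × String)
    (h : g ≠ []) :
    pvMergeT (g ++ [r]) =
      (pvMergeS g ++ " " ++ r.1, pvMergeM g ++ "I" ++ r.2.1,
       pvMergeC g ++ pvHeadStr r.2.2 ++ r.2.2) := by
  obtain ⟨x, t, rfl⟩ : ∃ x t, g = x :: t := by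
    cases g with
    | nil => exact absurd rfl h
    | cons x t => exact ⟨x, t, rfl⟩
  refine Prod.ext ?_ (Prod.ext ?_ ?_)
  · simpa [pvMergeT, pvMergeS] using pv_join_concat " " r.1 x.1 (t.map (·.1))
  · simpa [pvMergeT, pvMergeM] using pv_join_concat "I" r.2.1 x.2.1 (t.map (·.2.1))
  · simp only [pvMergeT, pvMergeC]
    rw [← String.toList_inj]
    cases t with
    | nil => simp [PySem.Chars.join_singleton]
    | cons z zs =>
        have h1 := congrArg String.toList
          (pv_join_concat "" (pvHeadStr r.2.2 ++ r.2.2) (pvHeadStr z.2.2 ++ z.2.2)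
            (zs.map (fun q => pvHeadStr q.2.2 ++ q.2.2)))
        simp at h1 ⊢
        simp [h1]

-- phase 1: one group already open (gs ++ [cur]); A's tmp mirrors cur, A's
-- flushed lists mirror the seed b followed by the closed groups gs
theorem pv_phase1 (rest : List (String × String × String)) :
    ∀ (gs : List (List (String × String × String))) (cur : List (String × String × String))
      (b : String × String × String), cur ≠ [] →
      pvFinishA (rest.foldl pvStepA (pvOutA b gs, pvMergeT cur)) =
        pvFinishB (rest.foldl pvStepB (gs ++ [cur])) := by
  induction rest with
  | nil =>
      intro gs cur b _
      simp [pvFinishA, pvFinishB, pvOutA]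
  | cons r rest ih =>
      intro gs cur b hcur
      by_cases h : pvIsBO r.2.1
      · have hA : pvStepA (pvOutA b gs, pvMergeT cur) r = (pvOutA b (gs ++ [cur]), pvMergeT [r]) := by
          simp [pvStepA, pvOutA, h, pvMergeT]
          exact (pv_mergeT_single r).symm
        have hB : pvStepB (gs ++ [cur]) r = (gs ++ [cur]) ++ [[r]] := by
          simp [pvStepB, h]
        simp only [List.foldl_cons, hA, hB]
        exact ih (gs ++ [cur]) [r] b (by simp)
      · have hA : pvStepA (pvOutA b gs, pvMergeT cur) r = (pvOutA b gs, pvMergeT (cur ++ [r])) := by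
          rw [pv_mergeT_snoc cur r hcur]
          simp [pvStepA, pvOutA, h, pvMergeT]
        have hB : pvStepB (gs ++ [cur]) r = gs ++ [cur ++ [r]] := by
          simp [pvStepB, h]
        simp only [List.foldl_cons, hA, hB]
        exact ih gs (cur ++ [r]) b (by simp)

-- phase 0: no boundary seen yet; A carries an arbitrary blob t, B has no group
theorem pv_phase0 (rest : List (String × String × String)) :
    ∀ (t : String × String × String),
      pvFinishA (rest.foldl pvStepA (([], [], []), t)) = pvFinishB (rest.foldl pvStepB []) := by
  induction rest with
  | nil => intro t; simp [pvFinishA, pvFinishB]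
  | cons r rest ih =>
      intro t
      by_cases h : pvIsBO r.2.1
      · have hA : pvStepA (([], [], []), t) r = (pvOutA t [], pvMergeT [r]) := by
          simp [pvStepA, pvOutA, h, pvMergeT]
          exact (pv_mergeT_single r).symm
        have hB : pvStepB [] r = [] ++ [[r]] := by simp [pvStepB, h]
        simp only [List.foldl_cons, hA, hB]
        exact pv_phase1 rest [] [r] t (by simp)
      · have hA : pvStepA (([], [], []), t) r
            = (([], [], []), (t.1 ++ " " ++ r.1, t.2.1 ++ "I" ++ r.2.1, t.2.2 ++ pvHeadStr r.2.2 ++ r.2.2)) := by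
          simp [pvStepA, h]
        have hB : pvStepB [] r = [] := by simp [pvStepB, h]
        simp only [List.foldl_cons, hA, hB]
        exact ih _

-- ===== VERDICT (by name: the statement is the Claim_ definition above) =====
theorem sentence_fix_spec : Claim_equal_sentence_fix := by
  intro sentences masks codes _ hpre
  obtain ⟨hs, hm, hc, _⟩ := hpre
  unfold Spec_sentence_fix
  obtain ⟨s0, s', rfl⟩ : ∃ x t, sentences = x :: t := by
    cases sentences with
    | nil => exact absurd rfl hs
    | cons x t => exact ⟨x, t, rfl⟩
  obtain ⟨m0, m', rfl⟩ : ∃ x t, masks = x :: t := by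
    cases masks with
    | nil => exact absurd rfl hm
    | cons x t => exact ⟨x, t, rfl⟩
  obtain ⟨c0, c', rfl⟩ : ∃ x t, codes = x :: t := by
    cases codes with
    | nil => exact absurd rfl hc
    | cons x t => exact ⟨x, t, rfl⟩
  show sentence_fix _ _ _ = sentence_fix_alt _ _ _
  unfold sentence_fix sentence_fix_alt
  simp only [PySem.List.pyGet?_zero_cons]
  exact pv_phase0 (((s0 :: s').zip ((m0 :: m').zip (c0 :: c')))) (s0, m0, c0)
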